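-- pv_equiv track=rewrite | github.com/timid-zy/competitive-programming | src/leetcode/leetcode/sorting-the-sentence.py | sortSentence
-- ===== SOURCE A (Python) =====
-- def sortSentence(s: str) -> str:
--     def getIdx(s): return int(s[-1])
--     arr = s.split(" ")
--     arr.sort(key=getIdx)
--
--     ret_str = ""
--     for i in range(len(arr)):
--         ret_str += arr[i][:-1] + " "
--     return ret_str[:-1]
-- ===== SOURCE B (Python) =====
-- def sortSentence(s: str) -> str:
--     buckets = [[] for _ in range(10)]
--     for word in s.split(" "):
--         buckets[int(word[-1])].append(word[:-1])
--     out = []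
--     for b in buckets:
--         out.extend(b)
--     return " ".join(out)
-- ===== Notes on version B (the rewrite author's own statement) =====
-- stated objective: alternative
-- what changed: Replaces the comparison sort by key plus an index-loop string concatenation with a counting-sort-style placement into ten digit buckets (stripping the trailing digit on placement) followed by a single space-join.
import Mathlib
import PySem

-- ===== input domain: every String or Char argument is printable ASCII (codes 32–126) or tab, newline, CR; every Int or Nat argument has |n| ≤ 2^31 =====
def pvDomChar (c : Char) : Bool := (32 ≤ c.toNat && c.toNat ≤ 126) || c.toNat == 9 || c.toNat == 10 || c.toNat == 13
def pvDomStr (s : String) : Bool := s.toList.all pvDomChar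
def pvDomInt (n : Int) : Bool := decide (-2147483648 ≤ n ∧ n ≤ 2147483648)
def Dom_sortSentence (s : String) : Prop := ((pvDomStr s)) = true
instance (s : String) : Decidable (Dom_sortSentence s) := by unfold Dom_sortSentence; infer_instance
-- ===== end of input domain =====

-- B replaces A's comparison sort by the digit key with placement into ten digit buckets
-- (counting-sort style) followed by a single " ".join; same return value on Pre_ (objective: alternative).

-- ===== PORT A =====
def sortSentence (s : String) : String :=
  let arr0 := PySem.Chars.splitOn s.toList [' ']
  let arr := PySem.List.sorted arr0
      (fun w => ((PySem.List.pyGet? w (-1)).bind (fun c => PySem.Int.ofChars? [c])).getD 0)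
  let ret := (PySem.List.pyRange 0 (PySem.List.len arr)).foldl
      (fun acc i => acc ++ (PySem.List.slice (PySem.List.pyGetD arr i []) none (some (-1)) ++ [' '])) []
  String.ofList (PySem.List.slice ret none (some (-1)))

-- ===== PORT B =====
def sortSentence_alt (s : String) : String :=
  let words := PySem.Chars.splitOn s.toList [' ']
  let buckets := words.foldl
      (fun bs w =>
        let d := ((PySem.List.pyGet? w (-1)).bind (fun c => PySem.Int.ofChars? [c])).getD 0
        PySem.List.pySetD bs d
          (PySem.List.pyGetD bs d [] ++ [PySem.List.slice w none (some (-1))]))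
      (List.replicate 10 ([] : List (List Char)))
  let out := buckets.foldl (fun acc b => acc ++ b) []
  String.ofList (PySem.Chars.join [' '] out)

-- ===== PRECONDITION & SPEC =====
-- Pre_ excludes exactly the inputs where A raises: some word of the space-split sentence is
-- empty (IndexError when indexing its last character) or ends in a non-digit (ValueError in int()).
def Pre_sortSentence (s : String) : Prop :=
  ∀ w ∈ PySem.Chars.splitOn s.toList [' '], w ≠ [] ∧ (w.getLastD ' ').isDigit = true
instance (s : String) : Decidable (Pre_sortSentence s) := by unfold Pre_sortSentence; infer_instance
def pvWitness_sortSentence : String := "is2 sentence4 This1 a3"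
def Spec_sortSentence (s : String) (out : String) : Prop := out = sortSentence_alt s
instance (s : String) (out : String) : Decidable (Spec_sortSentence s out) := by unfold Spec_sortSentence; infer_instance

-- ===== CLAIM (what is proved, stated in full; the proofs are below) =====
def Claim_equal_sortSentence : Prop := ∀ (s : String), Dom_sortSentence s → Pre_sortSentence s → Spec_sortSentence s (sortSentence s)

-- ===== LEMMAS AND PROOFS =====

-- the digit key int(w[-1]) shared by both ports (default 0 is only reached outside Pre_)
def pvKey (w : List Char) : Int :=
  ((PySem.List.pyGet? w (-1)).bind (fun c => PySem.Int.ofChars? [c])).getD 0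

def pvDigits : List Int := [0,1,2,3,4,5,6,7,8,9]

-- a digit character parses to a value in [0,10)
lemma pv_ofChars_digit (c : Char) (h : c.isDigit = true) :
    ∃ v : Int, PySem.Int.ofChars? [c] = some v ∧ 0 ≤ v ∧ v < 10 := by
  have h1 : 48 ≤ c.toNat ∧ c.toNat ≤ 57 := by
    simp [Char.isDigit, decide_eq_true_eq] at h; exact ⟨h.1, h.2⟩
  obtain ⟨a, b⟩ := h1
  rw [← Char.ofNat_toNat c]
  interval_cases h2 : c.toNat <;> decide

lemma pv_key_mem (w : List Char) (hne : w ≠ []) (hd : (w.getLastD ' ').isDigit = true) :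
    pvKey w ∈ pvDigits := by
  obtain ⟨c, hc⟩ := Option.isSome_iff_exists.mp (List.getLast?_isSome.mpr hne)
  rw [List.getLastD_eq_getLast?, hc] at hd
  simp only [Option.getD_some] at hd
  obtain ⟨v, hv, h0, h10⟩ := pv_ofChars_digit _ hd
  have hk : pvKey w = v := by simp [pvKey, PySem.List.pyGet?_neg_one, hc, hv]
  rw [hk]; simp [pvDigits]; omega

lemma pv_digits_get (i : Nat) (h : i < 10) : pvDigits[i]'(by simp [pvDigits]; omega) = (i : Int) := by
  interval_cases i <;> rfl

lemma pv_digits_mem_iff (k : Int) : k ∈ pvDigits ↔ 0 ≤ k ∧ k < 10 := by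
  simp [pvDigits]; omega

-- insertBy passes over a prefix none of whose elements trigger `before`
lemma pv_insertBy_append_left {α : Type} (before : α → α → Bool) (x : α) (as bs : List α)
    (h : ∀ y ∈ as, before x y = false) :
    PySem.List.insertBy before x (as ++ bs) = as ++ PySem.List.insertBy before x bs := by
  induction as with
  | nil => simp
  | cons a as ih =>
    rw [List.cons_append, PySem.List.insertBy, h a (by simp)]
    simp only [Bool.false_eq_true, if_false, List.cons_append, List.cons.injEq, true_and]
    exact ih (fun y hy => h y (by simp [hy]))

lemma pv_insertBy_front {α : Type} (before : α → α → Bool) (x : α) (bs : List α)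
    (h : ∀ y ∈ bs, before x y = true) :
    PySem.List.insertBy before x bs = x :: bs := by
  cases bs with
  | nil => rfl
  | cons b bs => rw [PySem.List.insertBy, h b (by simp)]; simp

-- inserting into ascending blocks lands at the end of its own block
lemma pv_insertBy_blocks (key : List Char → Int) (x : List Char) (ds : List Int)
    (B : Int → List (List Char))
    (hsort : ds.Pairwise (· < ·))
    (hB : ∀ d ∈ ds, ∀ y ∈ B d, key y = d)
    (hmem : key x ∈ ds) :
    PySem.List.insertBy (fun a b => decide (key a < key b)) x (ds.map B).flatten
      = (ds.map (fun d => if d = key x then B d ++ [x] else B d)).flatten := by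
  induction ds with
  | nil => simp at hmem
  | cons d ds ih =>
    rw [List.pairwise_cons] at hsort
    obtain ⟨hd, hsort'⟩ := hsort
    rw [List.map_cons, List.flatten_cons, List.map_cons, List.flatten_cons]
    by_cases hk : d = key x
    · rw [pv_insertBy_append_left _ _ _ _
        (fun y hy => by simp [hB d (by simp) y hy, ← hk])]
      rw [pv_insertBy_front _ _ _
        (fun y hy => by
          obtain ⟨l, hl, hyl⟩ := List.mem_flatten.mp hy
          obtain ⟨d', hd', rfl⟩ := List.mem_map.mp hl
          simp [hB d' (by simp [hd']) y hyl, ← hk, hd d' hd'])]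
      rw [if_pos hk]
      have : (ds.map (fun d => if d = key x then B d ++ [x] else B d)) = ds.map B := by
        apply List.map_congr_left
        intro d' hd'
        rw [if_neg (by have := hd d' hd'; omega)]
      rw [this]; simp
    · have hk' : key x ∈ ds := (List.mem_cons.mp hmem).resolve_left (fun h => hk h.symm)
      have hdk : d < key x := hd _ hk'
      rw [pv_insertBy_append_left _ _ _ _
        (fun y hy => by simp [hB d (by simp) y hy]; omega)]
      rw [if_neg hk, ih hsort' (fun d' h' y hy => hB d' (by simp [h']) y hy) hk']

-- the stable sort by a digit key is the concatenation of the ten digit blocks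
lemma pv_sorted_eq_blocks (xs : List (List Char))
    (hx : ∀ x ∈ xs, pvKey x ∈ pvDigits) :
    PySem.List.sorted xs pvKey
      = (pvDigits.map (fun d => xs.filter (fun w => decide (pvKey w = d)))).flatten := by
  induction xs using List.reverseRecOn with
  | nil => simp [PySem.List.sorted_eq_foldl_insertBy, pvDigits]
  | append_singleton xs x ih =>
    rw [PySem.List.sorted_eq_foldl_insertBy, List.foldl_append, List.foldl_cons, List.foldl_nil,
      ← PySem.List.sorted_eq_foldl_insertBy,
      ih (fun y hy => hx y (by simp [hy]))]
    rw [pv_insertBy_blocks pvKey x pvDigits _ (by decide)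
      (fun d _ y hy => by simpa using (List.mem_filter.mp hy).2)
      (hx x (by simp))]
    congr 1
    apply List.map_congr_left
    intro d _
    rw [List.filter_append]
    by_cases hk : d = pvKey x
    · rw [if_pos hk]; simp [hk]
    · rw [if_neg hk]; simp [Ne.symm hk]

-- B's bucket fold computes the stripped digit blocks
lemma pv_buckets_eq (xs : List (List Char))
    (hx : ∀ x ∈ xs, pvKey x ∈ pvDigits) :
    xs.foldl
      (fun bs w =>
        let d := ((PySem.List.pyGet? w (-1)).bind (fun c => PySem.Int.ofChars? [c])).getD 0
        PySem.List.pySetD bs d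
          (PySem.List.pyGetD bs d [] ++ [PySem.List.slice w none (some (-1))]))
      (List.replicate 10 ([] : List (List Char)))
      = pvDigits.map (fun d => (xs.filter (fun w => decide (pvKey w = d))).map List.dropLast) := by
  induction xs using List.reverseRecOn with
  | nil => rfl
  | append_singleton xs x ih =>
    rw [List.foldl_append, List.foldl_cons, List.foldl_nil,
      ih (fun y hy => hx y (by simp [hy]))]
    have hkd := (pv_digits_mem_iff (pvKey x)).mp (hx x (by simp))
    set g := fun d => (xs.filter (fun w => decide (pvKey w = d))).map List.dropLast with hg
    show PySem.List.pySetD (pvDigits.map g) (pvKey x)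
        (PySem.List.pyGetD (pvDigits.map g) (pvKey x) [] ++ [PySem.List.slice x none (some (-1))]) = _
    have hlen : (pvDigits.map g).length = 10 := by simp [pvDigits]
    have hget : PySem.List.pyGetD (pvDigits.map g) (pvKey x) [] = g (pvKey x) := by
      rw [PySem.List.pyGetD_eq_getElem _ _ hkd.1 (by rw [hlen]; exact_mod_cast hkd.2)]
      rw [List.getElem_map]
      rw [pv_digits_get _ (by omega)]
      congr 1
      omega
    rw [hget, PySem.List.pySetD_of_nonneg _ _ hkd.1, PySem.List.slice_to_neg_one]
    apply List.ext_getElem (by simp [pvDigits])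
    intro i h1 h2
    rw [List.getElem_set]
    have hi : i < 10 := by simpa [pvDigits] using h2
    rw [List.getElem_map, List.getElem_map, pv_digits_get _ hi]
    by_cases he : (pvKey x).toNat = i
    · rw [if_pos he]
      have : (i : Int) = pvKey x := by omega
      rw [this]
      simp [hg, List.filter_append]
    · rw [if_neg he]
      have hne : ¬ pvKey x = (i : Int) := by omega
      simp [hg, List.filter_append, hne]

-- A's space-append-then-dropLast equals join with " "
lemma pv_flatMap_dropLast_eq_join (ws : List (List Char)) (f : List Char → List Char) :
    (ws.flatMap (fun w => f w ++ [' '])).dropLast = PySem.Chars.join [' '] (ws.map f) := by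
  induction ws with
  | nil => simp [PySem.Chars.join_nil]
  | cons w ws ih =>
    cases ws with
    | nil => simp [PySem.Chars.join_singleton]
    | cons w2 ws2 =>
      rw [List.flatMap_cons, List.map_cons, List.map_cons, PySem.Chars.join_cons_cons]
      rw [List.dropLast_append_of_ne_nil]
      · rw [List.map_cons] at ih
        rw [ih]
      · simp only [List.flatMap_cons]
        intro h; exact absurd (congrArg List.length h) (by simp)

-- ===== VERDICT (by name: the statement is the Claim_ definition above) =====
theorem sortSentence_spec : Claim_equal_sortSentence := by
  intro s _ hpre
  unfold Spec_sortSentence sortSentence sortSentence_alt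
  set ws := PySem.Chars.splitOn s.toList [' '] with hws
  have hmem : ∀ w ∈ ws, pvKey w ∈ pvDigits :=
    fun w hw => pv_key_mem w (hpre w hw).1 (hpre w hw).2
  show String.ofList
      (PySem.List.slice
        (List.foldl
          (fun acc i =>
            acc ++ (PySem.List.slice (PySem.List.pyGetD (PySem.List.sorted ws pvKey) i []) none (some (-1)) ++ [' ']))
          [] (PySem.List.pyRange 0 (PySem.List.len (PySem.List.sorted ws pvKey))))
        none (some (-1)))
    = String.ofList
      (PySem.Chars.join [' ']
        (List.foldl (fun acc b => acc ++ b) []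
          (List.foldl
            (fun bs w =>
              let d := ((PySem.List.pyGet? w (-1)).bind (fun c => PySem.Int.ofChars? [c])).getD 0
              PySem.List.pySetD bs d
                (PySem.List.pyGetD bs d [] ++ [PySem.List.slice w none (some (-1))]))
            (List.replicate 10 ([] : List (List Char))) ws)))
  rw [PySem.List.foldl_pyRange_zero_pyGetD (PySem.List.sorted ws pvKey) []
    (fun acc w => acc ++ (PySem.List.slice w none (some (-1)) ++ [' '])) []]
  rw [PySem.List.foldl_append_eq_flatMap, List.nil_append,
    PySem.List.slice_to_neg_one,
    pv_flatMap_dropLast_eq_join (PySem.List.sorted ws pvKey) (fun w => PySem.List.slice w none (some (-1)))]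
  rw [pv_buckets_eq ws hmem, pv_sorted_eq_blocks ws hmem]
  rw [PySem.List.foldl_append_eq_flatMap, List.nil_append, List.flatMap_id']
  congr 1
  simp only [PySem.List.slice_to_neg_one, List.map_flatten, List.map_map]
  rfl
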